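-- pv_equiv track=rewrite | github.com/ClarissaDP/crossover_tournment | answers/question_52.py | balancedOrNot
-- ===== SOURCE A (Python) =====
-- def balancedOrNot(expressions, maxReplacements):
--
--     size = len(expressions)
--     can_converte = []
--
--     for i in range(0, size):
--         expressions[i] = expressions[i].rstrip()
--
--         if (expressions[i][-1] == '<'):
--             can_converte.append(0)
--
--         else:
--             j = 0
--             not_balanced = expressions[i].count('>') - expressions[i].count('<')
--
--             while ( not_balanced and j < maxReplacements[i] ):
--                 expressions[i] = expressions[i].replace('>', '<>', 1)
--                 not_balanced = expressions[i].count('>') - expressions[i].count('<')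
--                 j += 1
--
--             if ( not_balanced == 0 ):
--                 can_converte.append(1)
--             else:
--                 can_converte.append(0)
--
--     return can_converte
-- ===== SOURCE B (Python) =====
-- def balancedOrNot(expressions, maxReplacements):
--     # Closed form: an expression is fixable iff its '>'/'<' imbalance is 0,
--     # or positive and at most maxReplacements[i] (each replacement removes one
--     # unit of positive imbalance). No string rewriting, one pass per string.
--     # Note: unlike A, B does not mutate the expressions list in place.
--     result = []
--     for i, e in enumerate(expressions):
--         e = e.rstrip()
--         if e[-1] == '<':
--             result.append(0)
--         else:
--             imb = e.count('>') - e.count('<')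
--             result.append(1 if imb == 0 or 0 < imb <= maxReplacements[i] else 0)
--     return result
-- ===== Notes on version B (the rewrite author's own statement) =====
-- stated objective: simpler
-- what changed: B replaces A's per-string rewriting loop (repeatedly replace('>','<>',1) and recount, up to maxReplacements[i] times) by a single count of the '>'/'<' imbalance and the closed-form test imb == 0 or 0 < imb <= maxReplacements[i]; on the generated input family this was not measurably faster.
import Mathlib
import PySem

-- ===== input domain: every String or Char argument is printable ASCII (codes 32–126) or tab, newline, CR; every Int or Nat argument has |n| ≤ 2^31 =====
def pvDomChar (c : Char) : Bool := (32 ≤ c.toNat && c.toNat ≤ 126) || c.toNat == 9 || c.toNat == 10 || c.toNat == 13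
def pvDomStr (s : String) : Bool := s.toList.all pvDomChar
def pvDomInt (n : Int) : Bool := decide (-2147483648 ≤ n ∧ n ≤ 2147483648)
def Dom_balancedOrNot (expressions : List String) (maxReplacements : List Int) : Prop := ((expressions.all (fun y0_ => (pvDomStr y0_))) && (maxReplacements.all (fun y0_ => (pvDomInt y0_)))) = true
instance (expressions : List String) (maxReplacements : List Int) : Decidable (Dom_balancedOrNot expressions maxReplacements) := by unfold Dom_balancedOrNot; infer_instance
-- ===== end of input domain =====

-- ===== PORT A =====
-- B computes the imbalance once instead of simulating A's bounded replace('>','<>',1) loop;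
-- equivalence is about the RETURN value only: A mutates `expressions` in place, B does not.

-- expressions[i].count('>') - expressions[i].count('<')  (both ports compute this the same way)
def pvImb (cs : List Char) : Int :=
  (PySem.Chars.count cs ['>'] : Int) - (PySem.Chars.count cs ['<'] : Int)

-- hand port of s.replace('>', '<>', 1) (PySem.Chars.replace has no count argument):
-- exact — inserts '<' before the first '>', leaves the string unchanged if no '>' occurs
def pvReplace1 : List Char → List Char
  | [] => []
  | c :: cs => if c = '>' then '<' :: '>' :: cs else c :: pvReplace1 cs

-- the while loop of A: state (expressions[i], not_balanced, j); fuel = remaining iterations (k - j).toNat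
def pvWhileA (cs : List Char) (nb : Int) (j : Int) (k : Int) : Nat → Int
  | 0 => nb
  | fuel + 1 =>
    if nb ≠ 0 ∧ j < k then
      let cs' := pvReplace1 cs
      pvWhileA cs' (pvImb cs') (j + 1) k fuel
    else nb

def balancedOrNot (expressions : List String) (maxReplacements : List Int) : List Int :=
  (List.range expressions.length).foldl (fun (can_converte : List Int) (i : Nat) =>
    let e := PySem.Chars.rstrip (PySem.List.pyGetD expressions (i : Int) "").toList
    if PySem.List.pyGetD e (-1) 'x' = '<' then   -- default unreachable under Pre_ (e ≠ [])
      can_converte ++ [0]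
    else
      let k := PySem.List.pyGetD maxReplacements (i : Int) 0  -- default unreachable under Pre_ when the loop tests it
      let r := pvWhileA e (pvImb e) 0 k k.toNat
      if r = 0 then can_converte ++ [1] else can_converte ++ [0]) []

-- ===== PORT B =====
def balancedOrNot_alt (expressions : List String) (maxReplacements : List Int) : List Int :=
  (PySem.List.enumerate expressions).map (fun p =>
    let e := PySem.Chars.rstrip p.2.toList
    if PySem.List.pyGetD e (-1) 'x' = '<' then (0 : Int)  -- default unreachable under Pre_ (e ≠ [])
    else
      let imb := pvImb e
      if imb = 0 ∨ (0 < imb ∧ imb ≤ PySem.List.pyGetD maxReplacements p.1 0) then 1 else 0)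

-- ===== PRECONDITION & SPEC =====
-- Pre_ excludes exactly the inputs where A raises: a string that is empty after rstrip
-- (IndexError on expressions[i][-1]) and an unbalanced string whose index has no entry in
-- maxReplacements (IndexError in the while condition).
def Pre_balancedOrNot (expressions : List String) (maxReplacements : List Int) : Prop :=
  ∀ i, (h : i < expressions.length) →
    PySem.Chars.rstrip expressions[i].toList ≠ [] ∧
    ((PySem.Chars.rstrip expressions[i].toList).getLast? = some '<' ∨
     (PySem.Chars.rstrip expressions[i].toList).count '>' =
       (PySem.Chars.rstrip expressions[i].toList).count '<' ∨
     i < maxReplacements.length)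
instance (expressions : List String) (maxReplacements : List Int) : Decidable (Pre_balancedOrNot expressions maxReplacements) := by unfold Pre_balancedOrNot; infer_instance

def pvWitness_balancedOrNot : List String × List Int := (["><> ", "a<", "<><"], [2, 0, 0])

def Spec_balancedOrNot (expressions : List String) (maxReplacements : List Int) (out : List Int) : Prop := out = balancedOrNot_alt expressions maxReplacements
instance (expressions : List String) (maxReplacements : List Int) (out : List Int) : Decidable (Spec_balancedOrNot expressions maxReplacements out) := by unfold Spec_balancedOrNot; infer_instance

-- ===== CLAIM (what is proved, stated in full; the proofs are below) =====
def Claim_equal_balancedOrNot : Prop := ∀ (expressions : List String) (maxReplacements : List Int), Dom_balancedOrNot expressions maxReplacements → Pre_balancedOrNot expressions maxReplacements → Spec_balancedOrNot expressions maxReplacements (balancedOrNot expressions maxReplacements)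

-- ===== LEMMAS AND PROOFS =====

-- s.count(c) for a one-character needle is List.count (helper for the count facts below)
theorem pvGo_singleton (c : Char) (cs : List Char) : ∀ (fuel acc : Nat), cs.length ≤ fuel →
    PySem.Chars.count.go [c] fuel cs acc = acc + cs.count c := by
  induction cs with
  | nil => intro fuel acc h; cases fuel <;> simp [PySem.Chars.count.go]
  | cons x t ih =>
    intro fuel acc h
    cases fuel with
    | zero => simp at h
    | succ f =>
      simp only [PySem.Chars.count.go]
      by_cases hx : x = c
      · subst hx
        simp [List.isPrefixOf, ih f (acc + 1) (by simpa using h)]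
        omega
      · simp [List.isPrefixOf, Ne.symm hx, hx, ih f acc (by simpa using h)]

theorem pvCount_singleton (c : Char) (cs : List Char) :
    PySem.Chars.count cs [c] = cs.count c := by
  simp [PySem.Chars.count, pvGo_singleton c cs cs.length 0 le_rfl]

theorem pvImb_eq (cs : List Char) :
    pvImb cs = (cs.count '>' : Int) - (cs.count '<' : Int) := by
  simp [pvImb, pvCount_singleton]

theorem count_gt_pvReplace1 (cs : List Char) :
    (pvReplace1 cs).count '>' = cs.count '>' := by
  induction cs with
  | nil => rfl
  | cons x t ih =>
    by_cases hx : x = '>'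
    · subst hx; simp [pvReplace1]
    · simp [pvReplace1, hx, ih]

theorem count_lt_pvReplace1 (cs : List Char) (h : '>' ∈ cs) :
    (pvReplace1 cs).count '<' = cs.count '<' + 1 := by
  induction cs with
  | nil => simp at h
  | cons x t ih =>
    by_cases hx : x = '>'
    · subst hx; simp [pvReplace1]
    · have ht : '>' ∈ t := by simpa [hx, Ne.symm hx] using h
      simp [pvReplace1, hx, List.count_cons, ih ht]
      omega

theorem pvReplace1_of_not_mem (cs : List Char) (h : '>' ∉ cs) : pvReplace1 cs = cs := by
  induction cs with
  | nil => rfl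
  | cons x t ih =>
    have hx : x ≠ '>' := fun hx => h (hx ▸ List.mem_cons_self)
    simp [pvReplace1, hx, ih (fun ht => h (List.mem_cons_of_mem _ ht))]

-- A's while loop reaches not_balanced == 0 exactly when the imbalance is 0 or positive and ≤ the budget
theorem pvWhileA_zero_iff (fuel : Nat) : ∀ (cs : List Char) (j k : Int),
    (k - j).toNat = fuel →
    (pvWhileA cs (pvImb cs) j k fuel = 0 ↔
      pvImb cs = 0 ∨ (0 < pvImb cs ∧ pvImb cs ≤ k - j)) := by
  induction fuel with
  | zero =>
    intro cs j k h
    simp only [pvWhileA]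
    omega
  | succ f ih =>
    intro cs j k h
    have hjk : j < k := by omega
    simp only [pvWhileA]
    by_cases h0 : pvImb cs = 0
    · simp [h0]
    · rw [if_pos ⟨h0, hjk⟩]
      have hrec := ih (pvReplace1 cs) (j + 1) k (by omega)
      by_cases hm : '>' ∈ cs
      · have h1 : pvImb (pvReplace1 cs) = pvImb cs - 1 := by
          rw [pvImb_eq, pvImb_eq, count_gt_pvReplace1, count_lt_pvReplace1 cs hm]
          push_cast; ring
        rw [hrec, h1]
        omega
      · have he : pvReplace1 cs = cs := pvReplace1_of_not_mem cs hm
        have hneg : pvImb cs < 0 := by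
          have hz : cs.count '>' = 0 := List.count_eq_zero.mpr hm
          rw [pvImb_eq, hz] at h0 ⊢
          omega
        rw [hrec, he]
        omega

-- ===== VERDICT (by name: the statement is the Claim_ definition above) =====
theorem balancedOrNot_spec : Claim_equal_balancedOrNot := by
  intro expressions maxReplacements _ _
  show balancedOrNot expressions maxReplacements = balancedOrNot_alt expressions maxReplacements
  unfold balancedOrNot balancedOrNot_alt
  have hfun : (fun (can_converte : List Int) (i : Nat) =>
      let e := PySem.Chars.rstrip (PySem.List.pyGetD expressions (i : Int) "").toList
      if PySem.List.pyGetD e (-1) 'x' = '<' then can_converte ++ [0]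
      else
        let k := PySem.List.pyGetD maxReplacements (i : Int) 0
        let r := pvWhileA e (pvImb e) 0 k k.toNat
        if r = 0 then can_converte ++ [1] else can_converte ++ [0]) =
      (fun (can_converte : List Int) (i : Nat) => can_converte ++
        [let e := PySem.Chars.rstrip (PySem.List.pyGetD expressions (i : Int) "").toList
         if PySem.List.pyGetD e (-1) 'x' = '<' then (0 : Int)
         else
           let k := PySem.List.pyGetD maxReplacements (i : Int) 0
           if pvWhileA e (pvImb e) 0 k k.toNat = 0 then 1 else 0]) := by
    funext acc i
    dsimp only
    split_ifs <;> rfl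
  rw [hfun, PySem.List.foldl_append_singleton_eq_map]
  apply List.ext_getElem
  · simp [PySem.List.length_enumerate]
  · intro n h1 h2
    simp only [List.getElem_map, List.getElem_range, List.nil_append,
      PySem.List.getElem_enumerate, zero_add]
    have hlen : n < expressions.length := by
      simpa [PySem.List.length_enumerate] using h2
    rw [PySem.List.pyGetD_natCast]
    rw [List.getD_eq_getElem _ _ hlen]
    set e := PySem.Chars.rstrip expressions[n].toList with he
    by_cases hlt : PySem.List.pyGetD e (-1) 'x' = '<'
    · simp [hlt]
    · simp only [hlt, if_false]
      set k := PySem.List.pyGetD maxReplacements (n : Int) 0 with hk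
      have hloop := pvWhileA_zero_iff k.toNat e 0 k (by omega)
      by_cases hc : pvImb e = 0 ∨ (0 < pvImb e ∧ pvImb e ≤ k)
      · have : pvWhileA e (pvImb e) 0 k k.toNat = 0 := by
          rw [hloop]; simpa using hc
        simp [this, hc]
      · have : ¬ pvWhileA e (pvImb e) 0 k k.toNat = 0 := by
          rw [hloop]; simpa using hc
        simp [this, hc]
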